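-- pv_equiv track=rewrite | github.com/Terukio/aoc2022 | day3.py | create_groups
-- ===== SOURCE A (Python) =====
-- def create_groups(data):
--     groups = []
--     current_group = []
--     for rucksack in data:
--         current_group.append(rucksack)
--         if len(current_group) == 3:
--             groups.append(current_group)
--             current_group = []
--     return groups
-- ===== SOURCE B (Python) =====
-- def create_groups(data):
--     return [list(t) for t in zip(*[iter(data)] * 3)]
-- ===== Notes on version B (the rewrite author's own statement) =====
-- stated objective: idiomatic
-- what changed: Replaces the explicit accumulator loop with the grouper idiom: zip three copies of one shared iterator, letting zip's stop-at-shortest rule drop the incomplete remainder.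
import Mathlib
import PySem

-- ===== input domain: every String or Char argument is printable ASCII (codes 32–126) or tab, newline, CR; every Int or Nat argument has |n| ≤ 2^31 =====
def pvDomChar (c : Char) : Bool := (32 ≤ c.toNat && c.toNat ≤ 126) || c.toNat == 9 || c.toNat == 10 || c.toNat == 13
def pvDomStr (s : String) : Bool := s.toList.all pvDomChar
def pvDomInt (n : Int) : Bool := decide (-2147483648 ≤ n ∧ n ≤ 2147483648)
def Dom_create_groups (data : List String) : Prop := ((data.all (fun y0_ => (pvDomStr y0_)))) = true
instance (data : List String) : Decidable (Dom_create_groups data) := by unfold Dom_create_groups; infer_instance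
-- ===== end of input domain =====

-- B replaces A's accumulator loop with the grouper idiom (three-at-a-time consumption); same result, idiomatic.


-- ===== PORT A =====
-- transliteration of A's for-loop: state (groups, current_group), append, flush at length 3
def create_groups (data : List String) : List (List String) :=
  (data.foldl
    (fun (st : List (List String) × List String) rucksack =>
      let current := st.2 ++ [rucksack]
      if current.length == 3 then (st.1 ++ [current], []) else (st.1, current))
    ([], [])).1

-- ===== PORT B =====
-- transliteration of B: the shared-iterator grouper consumes three elements per step,
-- zip stopping at the shortest copy ⇒ structural recursion taking three head elements at a time
def create_groups_alt (data : List String) : List (List String) :=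
  match data with
  | a :: b :: c :: rest => [a, b, c] :: create_groups_alt rest
  | _ => []

-- ===== PRECONDITION & SPEC =====
def Spec_create_groups (data : List String) (out : List (List String)) : Prop := out = create_groups_alt data
instance (data : List String) (out : List (List String)) : Decidable (Spec_create_groups data out) := by unfold Spec_create_groups; infer_instance

-- ===== CLAIM (what is proved, stated in full; the proofs are below) =====
def Claim_equal_create_groups : Prop := ∀ (data : List String), Dom_create_groups data → Spec_create_groups data (create_groups data)

-- ===== LEMMAS AND PROOFS =====
theorem create_groups_loop (data : List String) (gs : List (List String)) :
    (data.foldl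
      (fun (st : List (List String) × List String) rucksack =>
        let current := st.2 ++ [rucksack]
        if current.length == 3 then (st.1 ++ [current], []) else (st.1, current))
      (gs, [])).1 = gs ++ create_groups_alt data := by
  induction data using create_groups_alt.induct generalizing gs with
  | case1 a b c rest ih =>
      have h := ih (gs ++ [[a, b, c]])
      simp only [List.foldl] at h ⊢
      simpa [create_groups_alt] using h
  | case2 d h =>
      rcases d with _ | ⟨a, _ | ⟨b, _ | ⟨c, rest⟩⟩⟩
      · simp [create_groups_alt]
      · simp [List.foldl, create_groups_alt]
      · simp [List.foldl, create_groups_alt]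
      · exact absurd rfl (h a b c rest)

-- ===== VERDICT (by name: the statement is the Claim_ definition above) =====
theorem create_groups_spec : Claim_equal_create_groups := by
  intro data _
  unfold Spec_create_groups create_groups
  simpa using create_groups_loop data []
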